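-- pv_equiv track=rewrite | github.com/mandersonGH/MOONJAM | PlottingDrivers/PIPE3D/plotPIPE3D.py | removeNonRequested
-- ===== SOURCE A (Python) =====
-- import copy
--
-- def removeNonRequested(plotsToMake, requestedWithin):
--     plotNames = copy.copy(list(plotsToMake.keys()))
--     for key in plotNames:
--         flag = False
--         for withinTextVec in requestedWithin:
--             currFlag = True
--             for withinComponent in withinTextVec:
--                 if not flag and withinComponent not in key:
--                     currFlag = False
--             if currFlag:
--                 flag = True
--         if not flag:
--             del plotsToMake[key]
--     return plotsToMake
-- ===== SOURCE B (Python) =====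
-- def removeNonRequested(plotsToMake, requestedWithin):
--     # Collect the set of keys matched by some pattern vector, then delete the rest in place.
--     keep = set()
--     for vec in requestedWithin:
--         for key in plotsToMake:
--             if all(comp in key for comp in vec):
--                 keep.add(key)
--     for key in list(plotsToMake.keys()):
--         if key not in keep:
--             del plotsToMake[key]
--     return plotsToMake
-- ===== Notes on version B (the rewrite author's own statement) =====
-- stated objective: alternative
-- what changed: B separates matching from deletion: it first builds a keep-set by looping vectors outer / keys inner with a plain all() per vector, then deletes non-kept keys in a second pass; A interleaves a three-deep flag-driven loop (with a redundant 'not flag' short-circuit) with deletion per key.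
import Mathlib
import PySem

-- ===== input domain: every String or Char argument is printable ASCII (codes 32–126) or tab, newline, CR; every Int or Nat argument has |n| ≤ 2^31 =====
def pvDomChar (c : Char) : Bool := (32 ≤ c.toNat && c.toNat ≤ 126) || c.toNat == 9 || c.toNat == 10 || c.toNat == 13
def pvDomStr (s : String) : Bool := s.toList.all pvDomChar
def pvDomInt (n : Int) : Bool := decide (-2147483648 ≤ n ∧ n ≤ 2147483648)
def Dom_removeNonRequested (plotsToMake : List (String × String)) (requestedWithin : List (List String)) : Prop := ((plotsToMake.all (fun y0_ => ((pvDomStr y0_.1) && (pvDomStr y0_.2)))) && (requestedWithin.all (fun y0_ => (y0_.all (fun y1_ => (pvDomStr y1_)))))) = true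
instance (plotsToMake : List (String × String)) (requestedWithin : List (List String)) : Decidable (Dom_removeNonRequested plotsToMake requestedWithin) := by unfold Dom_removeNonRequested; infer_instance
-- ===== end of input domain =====

-- A mutates the dict in place and returns it; the equivalence proved here is about the returned value.
-- B's change: matching is separated from deletion (keep-set built vectors-outer, then a second deletion pass).

-- ===== PORT A =====
-- del plotsToMake[key] on the association list
def pvDelKey (d : List (String × String)) (key : String) : List (String × String) :=
  d.filter (fun p => p.1 != key)

def removeNonRequested (plotsToMake : List (String × String)) (requestedWithin : List (List String)) : List (String × String) :=
  let plotNames := plotsToMake.map (·.1)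
  plotNames.foldl (fun d key =>
    let flag := requestedWithin.foldl (fun flag withinTextVec =>
      let currFlag := withinTextVec.foldl (fun currFlag withinComponent =>
        if !flag && !(PySem.Str.isIn withinComponent key) then false else currFlag) true
      if currFlag then true else flag) false
    if !flag then pvDelKey d key else d) plotsToMake

-- ===== PORT B =====
def removeNonRequested_alt (plotsToMake : List (String × String)) (requestedWithin : List (List String)) : List (String × String) :=
  let keep : PySem.Set String := requestedWithin.foldl (fun keep vec =>
    (plotsToMake.map (·.1)).foldl (fun keep key =>
      if vec.all (fun comp => PySem.Str.isIn comp key) then PySem.Set.add keep key else keep) keep)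
    PySem.Set.empty
  (plotsToMake.map (·.1)).foldl (fun d key =>
    if !(PySem.Set.contains keep key) then pvDelKey d key else d) plotsToMake

-- ===== PRECONDITION & SPEC =====
def Spec_removeNonRequested (plotsToMake : List (String × String)) (requestedWithin : List (List String)) (out : List (String × String)) : Prop := out = removeNonRequested_alt plotsToMake requestedWithin
instance (plotsToMake : List (String × String)) (requestedWithin : List (List String)) (out : List (String × String)) : Decidable (Spec_removeNonRequested plotsToMake requestedWithin out) := by unfold Spec_removeNonRequested; infer_instance

-- ===== CLAIM (what is proved, stated in full; the proofs are below) =====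
def Claim_equal_removeNonRequested : Prop := ∀ (plotsToMake : List (String × String)) (requestedWithin : List (List String)), Dom_removeNonRequested plotsToMake requestedWithin → Spec_removeNonRequested plotsToMake requestedWithin (removeNonRequested plotsToMake requestedWithin)

-- ===== LEMMAS AND PROOFS =====

-- A's inner loop with flag = false computes all-components-in-key
theorem pv_inner_false (key : String) (vec : List String) (c : Bool) :
    vec.foldl (fun currFlag withinComponent =>
      if !false && !(PySem.Str.isIn withinComponent key) then false else currFlag) c
      = (c && vec.all (fun comp => PySem.Str.isIn comp key)) := by
  induction vec generalizing c with
  | nil => simp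
  | cons x xs ih =>
    rw [List.foldl_cons, List.all_cons, ih]
    cases PySem.Str.isIn x key <;> simp

-- A's flag loop, once true, stays true
theorem pv_outer_true (key : String) (vs : List (List String)) :
    vs.foldl (fun flag withinTextVec =>
      let currFlag := withinTextVec.foldl (fun currFlag withinComponent =>
        if !flag && !(PySem.Str.isIn withinComponent key) then false else currFlag) true
      if currFlag then true else flag) true = true := by
  induction vs with
  | nil => rfl
  | cons v vs ih =>
    rw [List.foldl_cons, show (if (v.foldl (fun currFlag withinComponent =>
        if !true && !(PySem.Str.isIn withinComponent key) then false else currFlag) true) then true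
        else true) = true from ite_self true]
    exact ih

-- A's flag loop computes: some vector has all its components in key
theorem pv_flag_eq (key : String) (rw : List (List String)) :
    rw.foldl (fun flag withinTextVec =>
      let currFlag := withinTextVec.foldl (fun currFlag withinComponent =>
        if !flag && !(PySem.Str.isIn withinComponent key) then false else currFlag) true
      if currFlag then true else flag) false
      = rw.any (fun vec => vec.all (fun comp => PySem.Str.isIn comp key)) := by
  induction rw with
  | nil => rfl
  | cons v vs ih =>
    rw [List.foldl_cons, List.any_cons]
    have h1 : (v.foldl (fun currFlag withinComponent =>
        if !false && !(PySem.Str.isIn withinComponent key) then false else currFlag) true)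
        = v.all (fun comp => PySem.Str.isIn comp key) := by
      rw [pv_inner_false]; exact Bool.true_and _
    show (vs.foldl _ (if (v.foldl (fun currFlag withinComponent =>
        if !false && !(PySem.Str.isIn withinComponent key) then false else currFlag) true) then true
        else false)) = _
    rw [h1]
    cases hall : v.all (fun comp => PySem.Str.isIn comp key) with
    | true => simpa using pv_outer_true key vs
    | false => simpa using ih

-- contains after Set.add
theorem pv_contains_add (s : PySem.Set String) (y k : String) :
    PySem.Set.contains (PySem.Set.add s y) k = (PySem.Set.contains s k || y == k) := by
  apply Bool.eq_iff_iff.mpr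
  simp only [Bool.or_eq_true, beq_iff_eq, PySem.Set.contains_iff, PySem.Set.mem_add]
  constructor
  · rintro (h | h)
    · exact Or.inl h
    · exact Or.inr h.symm
  · rintro (h | h)
    · exact Or.inl h
    · exact Or.inr h.symm

-- membership in B's keep set after folding one pass over keys
theorem pv_keep_pass (vec : List String) (keys : List String) (s : PySem.Set String) (k : String) :
    PySem.Set.contains (keys.foldl (fun keep key =>
      if vec.all (fun comp => PySem.Str.isIn comp key) then PySem.Set.add keep key else keep) s) k
      = (PySem.Set.contains s k ||
         keys.any (fun key => key == k && vec.all (fun comp => PySem.Str.isIn comp key))) := by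
  induction keys generalizing s with
  | nil => simp
  | cons x xs ih =>
    rw [List.foldl_cons, List.any_cons, ih]
    by_cases h : vec.all (fun comp => PySem.Str.isIn comp x) = true
    · rw [if_pos h, pv_contains_add, h, Bool.and_true, Bool.or_assoc]
    · rw [if_neg h, Bool.eq_false_iff.mpr h, Bool.and_false, Bool.false_or]

-- membership in B's full keep set
theorem pv_keep_eq (rw : List (List String)) (keys : List String) (s : PySem.Set String) (k : String) :
    PySem.Set.contains (rw.foldl (fun keep vec =>
      keys.foldl (fun keep key =>
        if vec.all (fun comp => PySem.Str.isIn comp key) then PySem.Set.add keep key else keep) keep) s) k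
      = (PySem.Set.contains s k ||
         rw.any (fun vec => keys.any (fun key => key == k && vec.all (fun comp => PySem.Str.isIn comp key)))) := by
  induction rw generalizing s with
  | nil => simp
  | cons v vs ih =>
    rw [List.foldl_cons, List.any_cons, ih, pv_keep_pass, Bool.or_assoc]

-- for k among the keys, keep-membership reduces to the any/all predicate
theorem pv_keep_mem (rw : List (List String)) (keys : List String) (k : String) (hk : k ∈ keys) :
    PySem.Set.contains (rw.foldl (fun keep vec =>
      keys.foldl (fun keep key =>
        if vec.all (fun comp => PySem.Str.isIn comp key) then PySem.Set.add keep key else keep) keep)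
      PySem.Set.empty) k
      = rw.any (fun vec => vec.all (fun comp => PySem.Str.isIn comp k)) := by
  rw [pv_keep_eq]
  have he : PySem.Set.contains (PySem.Set.empty : PySem.Set String) k = false := by
    apply Bool.eq_false_iff.mpr
    intro h
    have := (PySem.Set.contains_iff _ _).mp h
    simp [PySem.Set.empty] at this
  rw [he, Bool.false_or]
  apply Bool.eq_iff_iff.mpr
  simp only [List.any_eq_true, List.all_eq_true, Bool.and_eq_true, beq_iff_eq]
  constructor
  · rintro ⟨vec, hv, key, _, rfl, hall⟩
    exact ⟨vec, hv, hall⟩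
  · rintro ⟨vec, hv, hall⟩
    exact ⟨vec, hv, k, hk, rfl, hall⟩

-- ===== VERDICT (by name: the statement is the Claim_ definition above) =====
theorem removeNonRequested_spec : Claim_equal_removeNonRequested := by
  intro plotsToMake requestedWithin _
  unfold Spec_removeNonRequested removeNonRequested removeNonRequested_alt
  apply PySem.List.foldl_congr_mem
  intro d key hkey
  rw [pv_flag_eq, pv_keep_mem requestedWithin _ key hkey]
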